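-- pv_equiv track=rewrite | github.com/hl9082/RIT-CSCI141-and-CSCI-142-projects | Word statistic/printedWords.py | printedWords
-- ===== SOURCE A (Python) =====
-- def printedWords(words):
--     """
--     This function returns a list containing tuples (year, count total words) for each year for which data
--     exists. The list must be sorted in ascending order of year.
--     :param words: A dictionary mapping words to dictionaries with years and counts.
--     :return: A list containing tuples (year, count total words) for each year for which data
--     exists. The list must be sorted in ascending order of year.
--     """
--     dct={year:0 for word in words for year in words[word]}
--     for word in words:
--         for year in words[word]:
--             if year not in dct:
--                 dct[year]=0
--             dct[year]+=words[word][year]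
--     return sorted(dct.items(),key=lambda x:x[0])
-- ===== SOURCE B (Python) =====
-- def printedWords(words):
--     """Alternative decomposition: flatten all (year, count) pairs, sort the
--     distinct years, and compute each year's total by a per-year scan of the
--     flat pair list -- no accumulation dict is maintained."""
--     pairs = [(year, cnt) for counts in words.values() for year, cnt in counts.items()]
--     years = sorted({year for year, _ in pairs})
--     return [(year, sum(c for y, c in pairs if y == year)) for year in years]
-- ===== Notes on version B (the rewrite author's own statement) =====
-- stated objective: alternative
-- what changed: Replaces A's zero-init dict comprehension plus accumulation loop and items-sort by flattening all (year,count) pairs, sorting the distinct years, and computing each year's total with a per-year scan of the flat pair list.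
import Mathlib
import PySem

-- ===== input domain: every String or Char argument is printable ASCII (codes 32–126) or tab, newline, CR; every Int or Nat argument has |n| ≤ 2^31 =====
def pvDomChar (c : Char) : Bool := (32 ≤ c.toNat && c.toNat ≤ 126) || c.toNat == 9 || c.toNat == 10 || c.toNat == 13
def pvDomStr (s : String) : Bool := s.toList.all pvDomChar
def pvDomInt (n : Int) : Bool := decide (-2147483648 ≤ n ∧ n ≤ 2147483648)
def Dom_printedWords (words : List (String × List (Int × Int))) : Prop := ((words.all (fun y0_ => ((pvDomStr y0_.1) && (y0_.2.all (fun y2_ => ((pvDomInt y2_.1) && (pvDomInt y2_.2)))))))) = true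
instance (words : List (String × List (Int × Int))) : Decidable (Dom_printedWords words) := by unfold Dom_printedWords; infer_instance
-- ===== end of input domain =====

-- B replaces A's accumulation dict by a per-year summation scan over the flat (year, count) pair list, keyed by the sorted distinct years (alternative decomposition, not faster).

-- ===== PORT A =====
-- dct = {year: 0 for word in words for year in words[word]}
-- for word in words: for year in words[word]: if year not in dct: dct[year] = 0; dct[year] += words[word][year]
-- return sorted(dct.items(), key=lambda x: x[0])
def printedWords (words : List (String × List (Int × Int))) : List (Int × Int) :=
  let dct0 : PySem.Dict Int Int :=
    words.foldl (fun d wp => wp.2.foldl (fun d yc => d.insert yc.1 0) d) PySem.Dict.empty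
  let dct : PySem.Dict Int Int :=
    words.foldl (fun d wp => wp.2.foldl (fun d yc =>
      (if d.contains yc.1 then d else d.insert yc.1 0).modify yc.1 0 (fun v => v + yc.2)) d) dct0
  PySem.List.sorted dct.items (fun x => x.1) false

-- ===== PORT B =====
-- pairs = [(year, cnt) for counts in words.values() for year, cnt in counts.items()]
-- years = sorted({year for year, _ in pairs})
-- return [(year, sum(c for y, c in pairs if y == year)) for year in years]
def printedWords_alt (words : List (String × List (Int × Int))) : List (Int × Int) :=
  let pairs : List (Int × Int) := words.flatMap (fun wp => wp.2)
  let years : List Int :=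
    PySem.List.sorted (PySem.Set.ofList (pairs.map (fun p => p.1))) (fun y => y) false
  years.map (fun y => (y, ((pairs.filter (fun p => p.1 == y)).map (fun p => p.2)).sum))

-- ===== PRECONDITION & SPEC =====
def Spec_printedWords (words : List (String × List (Int × Int))) (out : List (Int × Int)) : Prop := out = printedWords_alt words
instance (words : List (String × List (Int × Int))) (out : List (Int × Int)) : Decidable (Spec_printedWords words out) := by unfold Spec_printedWords; infer_instance

-- ===== CLAIM (what is proved, stated in full; the proofs are below) =====
def Claim_equal_printedWords : Prop := ∀ (words : List (String × List (Int × Int))), Dom_printedWords words → Spec_printedWords words (printedWords words)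

-- ===== LEMMAS AND PROOFS =====

-- total count printed in year y, over the flat pair list
def pvS (pairs : List (Int × Int)) (y : Int) : Int :=
  ((pairs.filter (fun p => p.1 == y)).map (fun p => p.2)).sum

lemma pvS_cons (yc : Int × Int) (t : List (Int × Int)) (k : Int) :
    pvS (yc :: t) k = (if yc.1 = k then yc.2 else 0) + pvS t k := by
  by_cases h : yc.1 = k <;> simp [pvS, h]

-- A's zero-initialising dict comprehension: every value reads 0
lemma pv_getD_init (l : List (Int × Int)) : ∀ (d : PySem.Dict Int Int),
    (∀ k, d.getD k 0 = 0) →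
    ∀ k, (l.foldl (fun d yc => d.insert yc.1 0) d).getD k 0 = 0 := by
  induction l with
  | nil => intro d h k; exact h k
  | cons yc t ih =>
      intro d h k
      simp only [List.foldl_cons]
      refine ih _ (fun k' => ?_) k
      rw [PySem.Dict.getD_insert]
      split_ifs
      · rfl
      · exact h k'

-- one accumulation step of A's loop, pointwise on values
lemma pv_step_getD (d : PySem.Dict Int Int) (yc : Int × Int) (k : Int) :
    ((if d.contains yc.1 then d else d.insert yc.1 0).modify yc.1 0 (fun v => v + yc.2)).getD k 0
      = if k = yc.1 then d.getD yc.1 0 + yc.2 else d.getD k 0 := by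
  rw [PySem.Dict.getD_modify]
  cases hc : d.contains yc.1 with
  | true => simp
  | false =>
      simp only [Bool.false_eq_true, if_false]
      rw [PySem.Dict.getD_of_not_contains d 0 hc]
      split_ifs with hk
      · rw [PySem.Dict.getD_insert, if_pos rfl]
      · rw [PySem.Dict.getD_insert, if_neg hk]

-- A's whole accumulation loop, pointwise on values
lemma pv_acc_getD (l : List (Int × Int)) : ∀ (d : PySem.Dict Int Int) (k : Int),
    (l.foldl (fun d yc =>
        (if d.contains yc.1 then d else d.insert yc.1 0).modify yc.1 0 (fun v => v + yc.2)) d).getD k 0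
      = d.getD k 0 + pvS l k := by
  induction l with
  | nil => intro d k; simp [pvS]
  | cons yc t ih =>
      intro d k
      simp only [List.foldl_cons]
      rw [ih, pv_step_getD, pvS_cons]
      by_cases hk : k = yc.1
      · subst hk; rw [if_pos rfl, if_pos rfl]; ring
      · rw [if_neg hk, if_neg (fun h => hk h.symm)]; ring

-- one accumulation step of A's loop, on keys
lemma pv_step_keys (d : PySem.Dict Int Int) (yc : Int × Int) :
    ((if d.contains yc.1 then d else d.insert yc.1 0).modify yc.1 0 (fun v => v + yc.2)).keys
      = PySem.Set.add d.keys yc.1 := by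
  by_cases hc : d.contains yc.1 = true
  · rw [if_pos hc, PySem.Dict.keys_modify, PySem.Dict.keys_insert_of_contains d _ hc,
      PySem.Set.add_of_mem ((PySem.Dict.contains_iff_mem_keys d yc.1).1 hc)]
  · have hcf : d.contains yc.1 = false := by simpa using hc
    rw [if_neg hc, PySem.Dict.keys_modify,
      PySem.Dict.keys_insert_of_contains _ _ (PySem.Dict.contains_insert_self d yc.1 0),
      PySem.Dict.keys_insert_of_not_contains d _ hcf,
      PySem.Set.add_of_not_mem (fun hm => hc ((PySem.Dict.contains_iff_mem_keys d yc.1).2 hm))]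

-- A's whole accumulation loop, on keys
lemma pv_acc_keys (l : List (Int × Int)) : ∀ (d : PySem.Dict Int Int),
    (l.foldl (fun d yc =>
        (if d.contains yc.1 then d else d.insert yc.1 0).modify yc.1 0 (fun v => v + yc.2)) d).keys
      = PySem.Set.update d.keys (l.map (fun p => p.1)) := by
  induction l with
  | nil => intro d; rfl
  | cons yc t ih =>
      intro d
      simp only [List.foldl_cons, List.map_cons]
      rw [ih, pv_step_keys]
      rfl

lemma pv_update_self (xs : List Int) : ∀ (s : PySem.Set Int),
    (∀ x ∈ xs, x ∈ s) → PySem.Set.update s xs = s := by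
  induction xs with
  | nil => intro s _; rfl
  | cons x t ih =>
      intro s h
      show PySem.Set.update (PySem.Set.add s x) t = s
      rw [PySem.Set.add_of_mem (h x (by simp))]
      exact ih s (fun y hy => h y (by simp [hy]))

-- a dict with distinct keys is its key list paired with its values
lemma pv_items_eq (d : PySem.Dict Int Int) (h : d.keys.Nodup) :
    d.items = d.keys.map (fun k => (k, d.getD k 0)) := by
  have hkeys : d.keys = d.items.map (fun p => p.1) := rfl
  rw [hkeys, List.map_map]
  symm
  have step : ∀ p ∈ d.items, ((fun k => (k, d.getD k 0)) ∘ (fun p : Int × Int => p.1)) p = id p := by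
    intro p hp
    have hv : d.getD p.1 0 = p.2 :=
      PySem.Dict.getD_of_mem_items d (by simpa using hp) h 0
    simp [Function.comp, hv]
  rw [List.map_congr_left step, List.map_id]

-- ===== VERDICT (by name: the statement is the Claim_ definition above) =====
theorem printedWords_spec : Claim_equal_printedWords := by
  intro words _
  simp only [Spec_printedWords, printedWords, printedWords_alt]
  simp only [← List.foldl_flatMap]
  set pairs : List (Int × Int) := words.flatMap (fun wp => wp.2) with hpairs
  set K : List Int := PySem.Set.ofList (pairs.map (fun p => p.1)) with hK
  set dct0 : PySem.Dict Int Int := pairs.foldl (fun d yc => d.insert yc.1 0) PySem.Dict.empty with hd0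
  set dct : PySem.Dict Int Int := pairs.foldl (fun d yc =>
      (if d.contains yc.1 then d else d.insert yc.1 0).modify yc.1 0 (fun v => v + yc.2)) dct0 with hd
  -- keys of the zero-initialising comprehension
  have hkeys0 : dct0.keys = K := by
    rw [hd0]
    refine (PySem.Dict.keys_foldl_insert_key pairs (fun yc => yc.1) (fun _ _ => 0)
      PySem.Dict.empty).trans ?_
    rw [PySem.Dict.keys_empty, hK, PySem.Set.ofList_eq_foldl]
    rfl
  -- keys of the accumulated dict
  have hkeys : dct.keys = K := by
    rw [hd, pv_acc_keys, hkeys0]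
    exact pv_update_self _ K (fun x hx => by rw [hK]; exact (PySem.Set.mem_ofList _ _).2 hx)
  have hnodup : dct.keys.Nodup := by rw [hkeys, hK]; exact PySem.Set.nodup_ofList _
  -- values of the accumulated dict
  have hval : ∀ k, dct.getD k 0 =
      ((pairs.filter (fun p => p.1 == k)).map (fun p => p.2)).sum := by
    intro k
    rw [hd, pv_acc_getD, hd0, pv_getD_init _ _ (fun k' => PySem.Dict.getD_empty k' 0)]
    exact zero_add _
  have hmap : K.map (fun k => (k, dct.getD k 0))
      = K.map (fun y => (y, ((pairs.filter (fun p => p.1 == y)).map (fun p => p.2)).sum)) :=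
    List.map_congr_left (fun k _ => congrArg (fun v => (k, v)) (hval k))
  rw [pv_items_eq dct hnodup, hkeys, hmap]
  -- both sides are the strictly key-increasing arrangement of the same list
  refine PySem.List.sorted_eq_of_perm_of_pairwise_lt _ _ _ ?_ ?_
  · exact (PySem.List.sorted_perm K (fun y => y) false).map _
  · rw [hK]
    exact List.Pairwise.map _ (fun a b h => h)
      (PySem.List.sorted_ofList_pairwise_lt (pairs.map (fun p => p.1)))
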